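-- pv_equiv track=rewrite | github.com/naurlaunim/u | 18_02/t10_1_mod.py | el_p
-- ===== SOURCE A (Python) =====
-- def el_p(i, j, n):
--     A = []
--     for u in range(n):
--         l = [0 for v in range(n)]
--         l[u] = 1
--         A.append(l)
--     A[i][j], A[i][i] = A[i][i], A[i][j]
--     A[j][i], A[j][j] = A[j][j], A[j][i]
--     return A
-- ===== SOURCE B (Python) =====
-- def el_p(i, j, n):
--     p = list(range(n))
--     p[i], p[j] = p[j], p[i]
--     return [[1 if p[u] == v else 0 for v in range(n)] for u in range(n)]
-- ===== Notes on version B (the rewrite author's own statement) =====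
-- stated objective: simpler
-- what changed: Instead of building an identity matrix and then swapping four entries of rows i and j in place, B first computes the swapped permutation array and emits every row directly in one uniform generating pass.
import Mathlib
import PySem

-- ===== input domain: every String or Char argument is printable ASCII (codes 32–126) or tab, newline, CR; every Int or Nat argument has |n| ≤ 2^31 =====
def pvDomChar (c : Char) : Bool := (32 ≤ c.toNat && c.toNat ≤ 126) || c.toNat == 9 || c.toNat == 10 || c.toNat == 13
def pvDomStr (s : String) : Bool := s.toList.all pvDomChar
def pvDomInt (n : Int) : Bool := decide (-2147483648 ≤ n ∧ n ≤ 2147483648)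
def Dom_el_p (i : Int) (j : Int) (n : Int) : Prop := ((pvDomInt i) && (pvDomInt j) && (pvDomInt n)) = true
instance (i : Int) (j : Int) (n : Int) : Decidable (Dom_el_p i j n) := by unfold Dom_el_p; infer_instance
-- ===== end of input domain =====

-- B builds the swapped permutation array first and emits every row in one uniform
-- generating pass, instead of A's identity-matrix construction followed by in-place
-- element swaps in rows i and j (objective: simpler; same O(n^2) cost).

-- ===== PORT A =====
-- literal port of A: build identity row by row, then the two tuple-assignment swaps
def el_p (i : Int) (j : Int) (n : Int) : List (List Int) :=
  let A := (PySem.List.pyRange 0 n 1).foldl (fun A u =>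
    let l := (PySem.List.pyRange 0 n 1).map (fun _ => (0 : Int))
    let l := PySem.List.pySetD l u 1      -- u ∈ range(n), always in range
    A ++ [l]) []
  -- A[i][j], A[i][i] = A[i][i], A[i][j]   (RHS evaluated first)
  let rowi := PySem.List.pyGetD A i []
  let t1 := PySem.List.pyGetD rowi i 0
  let t2 := PySem.List.pyGetD rowi j 0
  let A := PySem.List.pySetD A i (PySem.List.pySetD (PySem.List.pySetD rowi j t1) i t2)
  -- A[j][i], A[j][j] = A[j][j], A[j][i]
  let rowj := PySem.List.pyGetD A j []
  let s1 := PySem.List.pyGetD rowj j 0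
  let s2 := PySem.List.pyGetD rowj i 0
  PySem.List.pySetD A j (PySem.List.pySetD (PySem.List.pySetD rowj i s1) j s2)

-- ===== PORT B =====
-- literal port of Source B: p = list(range(n)); p[i], p[j] = p[j], p[i]; then the comprehension
def el_p_alt (i : Int) (j : Int) (n : Int) : List (List Int) :=
  let p := PySem.List.pyRange 0 n 1
  let q1 := PySem.List.pyGetD p j 0
  let q2 := PySem.List.pyGetD p i 0
  let p := PySem.List.pySetD (PySem.List.pySetD p i q1) j q2
  (PySem.List.pyRange 0 n 1).map (fun u =>
    (PySem.List.pyRange 0 n 1).map (fun v =>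
      if PySem.List.pyGetD p u 0 = v then 1 else 0))

-- ===== PRECONDITION & SPEC =====
-- Pre_ excludes exactly the inputs where the Python A raises IndexError:
-- n ≤ 0 (A[i] on the empty matrix) or i or j outside [-n, n).  B raises there too.
def Pre_el_p (i : Int) (j : Int) (n : Int) : Prop :=
  0 < n ∧ -n ≤ i ∧ i < n ∧ -n ≤ j ∧ j < n
instance (i : Int) (j : Int) (n : Int) : Decidable (Pre_el_p i j n) := by
  unfold Pre_el_p; infer_instance
def pvWitness_el_p : Int × Int × Int := (0, 1, 2)

def Spec_el_p (i : Int) (j : Int) (n : Int) (out : List (List Int)) : Prop := out = el_p_alt i j n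
instance (i : Int) (j : Int) (n : Int) (out : List (List Int)) : Decidable (Spec_el_p i j n out) := by unfold Spec_el_p; infer_instance

-- ===== CLAIM (what is proved, stated in full; the proofs are below) =====
def Claim_equal_el_p : Prop := ∀ (i : Int) (j : Int) (n : Int), Dom_el_p i j n → Pre_el_p i j n → Spec_el_p i j n (el_p i j n)

-- ===== LEMMAS AND PROOFS =====

-- normalized Python index (valid when -len ≤ i < len)
def nidx (len : Nat) (i : Int) : Nat := if 0 ≤ i then i.toNat else len - (-i).toNat

-- unit row e_k of length N
def eRow (N k : Nat) : List Int := (List.range N).map (fun v => if v = k then 1 else 0)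

-- the row-swapped identity matrix both programs compute
def canon (N ii jj : Nat) : List (List Int) :=
  (List.range N).map (fun u => eRow N (if u = ii then jj else if u = jj then ii else u))

theorem pyIdx?_norm (len : Nat) (i : Int) (h1 : -(len:Int) ≤ i) (h2 : i < len) :
    PySem.List.pyIdx? len i = some (nidx len i) := by
  unfold PySem.List.pyIdx? nidx
  split
  · rfl
  · rfl

theorem nidx_lt (len : Nat) (i : Int) (h1 : -(len:Int) ≤ i) (h2 : i < len) :
    nidx len i < len := by
  simp [nidx]; split <;> omega

theorem pyGetD_norm {α : Type} (xs : List α) (i : Int) (d : α)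
    (h1 : -(xs.length:Int) ≤ i) (h2 : i < xs.length) :
    PySem.List.pyGetD xs i d = xs.getD (nidx xs.length i) d := by
  simp [PySem.List.pyGetD, PySem.List.pyGet?, pyIdx?_norm _ _ h1 h2,
        List.getD_eq_getElem?_getD]

theorem pySetD_norm {α : Type} (xs : List α) (i : Int) (v : α)
    (h1 : -(xs.length:Int) ≤ i) (h2 : i < xs.length) :
    PySem.List.pySetD xs i v = xs.set (nidx xs.length i) v := by
  simp [PySem.List.pySetD, PySem.List.pySet?, pyIdx?_norm _ _ h1 h2]

theorem zeros_set (N k : Nat) (hk : k < N) :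
    ((List.range N).map (fun _ => (0:Int))).set k 1 = eRow N k := by
  apply List.ext_getElem (by simp [eRow])
  intro v h1 h2
  simp [eRow] at h2 ⊢
  rw [List.getElem_set]
  simp [List.getElem_range]
  split <;> simp_all [eq_comm]

theorem nidx_natCast (N k : Nat) : nidx N (k:Int) = k := by simp [nidx, Int.toNat_natCast]

theorem pyRange_cast (n : Int) :
    PySem.List.pyRange 0 n 1 = (List.range n.toNat).map (fun (k : Nat) => (k:Int)) := by
  rw [PySem.List.pyRange_one]
  norm_num

theorem pyGetD_norm' {α : Type} (xs : List α) (i : Int) (d : α) (N : Nat)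
    (hlen : xs.length = N) (h1 : -(N:Int) ≤ i) (h2 : i < N) :
    PySem.List.pyGetD xs i d = xs.getD (nidx N i) d := by
  subst hlen; exact pyGetD_norm xs i d h1 h2

theorem pySetD_norm' {α : Type} (xs : List α) (i : Int) (v : α) (N : Nat)
    (hlen : xs.length = N) (h1 : -(N:Int) ≤ i) (h2 : i < N) :
    PySem.List.pySetD xs i v = xs.set (nidx N i) v := by
  subst hlen; exact pySetD_norm xs i v h1 h2

theorem map_range_getD {α : Type} (f : Nat → α) (N k : Nat) (hk : k < N) (d : α) :
    ((List.range N).map f).getD k d = f k := by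
  simp [List.getD_eq_getElem?_getD, hk]

theorem eRow_getElem (N k v : Nat) (hv : v < (eRow N k).length) :
    (eRow N k)[v] = if v = k then 1 else 0 := by
  simp [eRow]

theorem eRow_swap (N a b : Nat) (hb : b < N) (hne : a ≠ b) :
    ((eRow N a).set b 1).set a 0 = eRow N b := by
  apply List.ext_getElem (by simp [eRow])
  intro v h1 h2
  rw [List.getElem_set, List.getElem_set, eRow_getElem N b v h2]
  by_cases e1 : a = v
  · rw [if_pos e1, if_neg (by omega)]
  · rw [if_neg e1]
    by_cases e2 : b = v
    · rw [if_pos e2, if_pos (by omega)]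
    · rw [if_neg e2, eRow_getElem N a v (by simpa [eRow] using h2),
          if_neg (by omega), if_neg (by omega)]

theorem id_set_self (N a : Nat) :
    ((List.range N).map (eRow N)).set a (eRow N a) = (List.range N).map (eRow N) := by
  apply List.ext_getElem (by simp)
  intro v h1 h2
  rw [List.getElem_set]
  split <;> simp_all

theorem eRow_set_one (N a : Nat) (ha : a < N) : (eRow N a).set a 1 = eRow N a := by
  apply List.ext_getElem (by simp)
  intro v h1 h2
  rw [List.getElem_set]
  split <;> simp_all [eRow]

theorem A_eq (i j n : Int) (h : Pre_el_p i j n) :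
    el_p i j n = canon n.toNat (nidx n.toNat i) (nidx n.toNat j) := by
  obtain ⟨hn, hi1, hi2, hj1, hj2⟩ := h
  have hN : ((n.toNat : Int)) = n := Int.toNat_of_nonneg (le_of_lt hn)
  set N := n.toNat with hNdef
  set ii := nidx N i with hiidef
  set jj := nidx N j with hjjdef
  have hii : ii < N := nidx_lt N i (by omega) (by omega)
  have hjj : jj < N := nidx_lt N j (by omega) (by omega)
  simp only [el_p]
  have hA0 : (PySem.List.pyRange 0 n 1).foldl
      (fun A u => A ++ [PySem.List.pySetD ((PySem.List.pyRange 0 n 1).map (fun _ => (0:Int))) u 1]) []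
      = (List.range N).map (eRow N) := by
    rw [PySem.List.foldl_append_singleton_eq_map, pyRange_cast, List.map_map]
    apply List.map_congr_left
    intro k hk
    have hkN : k < N := List.mem_range.mp hk
    simp only [Function.comp_apply]
    rw [PySem.List.pySetD_natCast, List.map_map]
    exact zeros_set N k hkN
  rw [hA0]
  have hlen : ((List.range N).map (eRow N)).length = N := by simp
  -- row i extraction and the first tuple assignment
  rw [pyGetD_norm' _ i _ N hlen (by omega) (by omega), ← hiidef,
      map_range_getD _ N ii hii]
  rw [pyGetD_norm' (eRow N ii) i 0 N (by simp [eRow]) (by omega) (by omega), ← hiidef,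
      pyGetD_norm' (eRow N ii) j 0 N (by simp [eRow]) (by omega) (by omega), ← hjjdef]
  rw [List.getD_eq_getElem _ _ (by simp [eRow]; omega),
      List.getD_eq_getElem _ _ (by simp [eRow]; omega),
      eRow_getElem N ii ii (by simp [eRow]; omega), if_pos rfl,
      eRow_getElem N ii jj (by simp [eRow]; omega)]
  rw [pySetD_norm' (eRow N ii) j _ N (by simp [eRow]) (by omega) (by omega), ← hjjdef,
      pySetD_norm' ((eRow N ii).set jj 1) i _ N (by simp [eRow]) (by omega) (by omega), ← hiidef,
      pySetD_norm' _ i _ N hlen (by omega) (by omega), ← hiidef]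
  by_cases hc : ii = jj
  · -- i and j name the same row: both swaps are no-ops, the matrix stays the identity
    rw [← hc, if_pos rfl, eRow_set_one N ii hii, eRow_set_one N ii hii, id_set_self N ii]
    rw [pyGetD_norm' _ j _ N hlen (by omega) (by omega), ← hjjdef, ← hc,
        map_range_getD _ N ii hii]
    rw [pyGetD_norm' (eRow N ii) j 0 N (by simp [eRow]) (by omega) (by omega), ← hjjdef, ← hc,
        pyGetD_norm' (eRow N ii) i 0 N (by simp [eRow]) (by omega) (by omega), ← hiidef]
    rw [List.getD_eq_getElem _ _ (by simp [eRow]; omega),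
        eRow_getElem N ii ii (by simp [eRow]; omega), if_pos rfl]
    rw [pySetD_norm' (eRow N ii) i _ N (by simp [eRow]) (by omega) (by omega), ← hiidef,
        pySetD_norm' ((eRow N ii).set ii 1) j _ N (by simp [eRow]) (by omega) (by omega), ← hjjdef, ← hc,
        pySetD_norm' _ j _ N hlen (by omega) (by omega), ← hjjdef, ← hc]
    rw [eRow_set_one N ii hii, eRow_set_one N ii hii, id_set_self N ii]
    unfold canon
    apply List.map_congr_left
    intro u hu
    by_cases e : u = ii <;> simp [e]
  · -- distinct rows: the two element swaps turn rows ii and jj into e_jj and e_ii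
    rw [if_neg (fun hh => hc hh.symm), eRow_swap N ii jj hjj hc]
    rw [pyGetD_norm' _ j _ N (by simpa using hlen) (by omega) (by omega), ← hjjdef]
    have hrowj : (((List.range N).map (eRow N)).set ii (eRow N jj)).getD jj [] = eRow N jj := by
      rw [List.getD_eq_getElem _ _ (by simpa using hjj), List.getElem_set, if_neg hc]
      simp [hjj]
    rw [hrowj]
    rw [pyGetD_norm' (eRow N jj) j 0 N (by simp [eRow]) (by omega) (by omega), ← hjjdef,
        pyGetD_norm' (eRow N jj) i 0 N (by simp [eRow]) (by omega) (by omega), ← hiidef]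
    rw [List.getD_eq_getElem _ _ (by simp [eRow]; omega),
        List.getD_eq_getElem _ _ (by simp [eRow]; omega),
        eRow_getElem N jj jj (by simp [eRow]; omega), if_pos rfl,
        eRow_getElem N jj ii (by simp [eRow]; omega), if_neg hc]
    rw [pySetD_norm' (eRow N jj) i _ N (by simp [eRow]) (by omega) (by omega), ← hiidef,
        pySetD_norm' ((eRow N jj).set ii 1) j _ N (by simp [eRow]) (by omega) (by omega), ← hjjdef,
        pySetD_norm' _ j _ N (by simpa using hlen) (by omega) (by omega), ← hjjdef]
    rw [eRow_swap N jj ii hii (fun hh => hc hh.symm)]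
    apply List.ext_getElem (by simp [canon])
    intro u h1 h2
    rw [List.getElem_set, List.getElem_set]
    simp only [canon, List.getElem_map, List.getElem_range]
    have hne : jj ≠ ii := fun hh => hc hh.symm
    by_cases e1 : u = ii
    · simp [e1, hne]
    · by_cases e2 : u = jj
      · simp [e2, hne, e1]
      · simp [e1, e2, (show jj ≠ u from fun hh => e2 hh.symm),
              (show ii ≠ u from fun hh => e1 hh.symm)]

theorem B_eq (i j n : Int) (h : Pre_el_p i j n) :
    el_p_alt i j n = canon n.toNat (nidx n.toNat i) (nidx n.toNat j) := by
  obtain ⟨hn, hi1, hi2, hj1, hj2⟩ := h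
  have hN : ((n.toNat : Int)) = n := Int.toNat_of_nonneg (le_of_lt hn)
  set N := n.toNat with hNdef
  set ii := nidx N i with hiidef
  set jj := nidx N j with hjjdef
  have hii : ii < N := nidx_lt N i (by omega) (by omega)
  have hjj : jj < N := nidx_lt N j (by omega) (by omega)
  simp only [el_p_alt]
  rw [pyRange_cast]
  have hlen : ((List.range N).map (fun (k : Nat) => (k:Int))).length = N := by simp
  rw [pyGetD_norm' _ j 0 N hlen (by omega) (by omega),
      pyGetD_norm' _ i 0 N hlen (by omega) (by omega), ← hiidef, ← hjjdef,
      map_range_getD _ N jj hjj, map_range_getD _ N ii hii,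
      pySetD_norm' _ i _ N hlen (by omega) (by omega),
      pySetD_norm' _ j _ N (by simp <;> omega) (by omega) (by omega)]
  apply List.ext_getElem (by simp [canon] <;> omega)
  intro u h1 h2
  simp only [canon, List.getElem_map, List.getElem_range]
  have hu : u < N := by simp at h1; omega
  rw [pyGetD_norm' _ (u:Int) 0 N (by simp) (by omega) (by exact_mod_cast hu),
      nidx_natCast]
  have hp : ((((List.range N).map (fun (k : Nat) => (k:Int))).set ii (jj:Int)).set jj (ii:Int)).getD u 0
      = ((if u = jj then ii else if u = ii then jj else u : Nat) : Int) := by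
    have hulen : u < ((((List.range N).map (fun (k : Nat) => (k:Int))).set ii (jj:Int)).set jj (ii:Int)).length := by
      simpa using hu
    rw [List.getD_eq_getElem _ _ hulen, List.getElem_set, List.getElem_set, List.getElem_map,
        List.getElem_range]
    by_cases e1 : jj = u <;> by_cases e2 : ii = u <;> simp [e1, e2] <;> omega
  rw [hp]
  have hperm : (if u = jj then ii else if u = ii then jj else u)
      = (if u = ii then jj else if u = jj then ii else u) := by
    by_cases e1 : u = ii <;> by_cases e2 : u = jj <;> simp [e1, e2] <;> omega
  rw [hperm]
  unfold eRow
  generalize (if u = ii then jj else if u = jj then ii else u) = s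
  apply List.ext_getElem (by simp <;> omega)
  intro v hv1 hv2
  simp only [List.getElem_map, List.getElem_range]
  by_cases e : v = s
  · simp [e]
  · have hne : ¬ ((s:Int) = (v:Int)) := fun hh => e (by exact_mod_cast hh.symm)
    simp [e, hne]

-- ===== VERDICT (by name: the statement is the Claim_ definition above) =====
theorem el_p_spec : Claim_equal_el_p := by
  intro i j n _ hpre
  unfold Spec_el_p
  rw [A_eq i j n hpre, B_eq i j n hpre]
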